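-- pv_equiv track=rewrite | github.com/HamzaDLM/netai | backend/app/tools/zabbix_tools.py | primary_ip
-- ===== SOURCE A (Python) =====
-- from typing import Annotated, Any
--
-- def primary_ip(host: dict[str, Any]) -> str:
--     interfaces = host.get("interfaces") or []
--     for iface in interfaces:
--         if str(iface.get("main", "0")) == "1":
--             ip = str(iface.get("ip") or "")
--             if ip:
--                 return ip
--     for iface in interfaces:
--         ip = str(iface.get("ip") or "")
--         if ip:
--             return ip
--     return ""
-- ===== SOURCE B (Python) =====
-- def primary_ip(host: dict) -> str:
--     main_ip = None
--     first_ip = None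
--     for iface in (host.get("interfaces") or []):
--         ip = str(iface.get("ip") or "")
--         if not ip:
--             continue
--         if first_ip is None:
--             first_ip = ip
--         if main_ip is None and str(iface.get("main", "0")) == "1":
--             main_ip = ip
--     if main_ip is not None:
--         return main_ip
--     if first_ip is not None:
--         return first_ip
--     return ""
-- ===== Notes on version B (the rewrite author's own statement) =====
-- stated objective: alternative
-- what changed: Replaces A's two sequential early-return scans over the interfaces with a single traversal that tracks the first main-interface IP and the first IP in two write-once accumulators.
import Mathlib
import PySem

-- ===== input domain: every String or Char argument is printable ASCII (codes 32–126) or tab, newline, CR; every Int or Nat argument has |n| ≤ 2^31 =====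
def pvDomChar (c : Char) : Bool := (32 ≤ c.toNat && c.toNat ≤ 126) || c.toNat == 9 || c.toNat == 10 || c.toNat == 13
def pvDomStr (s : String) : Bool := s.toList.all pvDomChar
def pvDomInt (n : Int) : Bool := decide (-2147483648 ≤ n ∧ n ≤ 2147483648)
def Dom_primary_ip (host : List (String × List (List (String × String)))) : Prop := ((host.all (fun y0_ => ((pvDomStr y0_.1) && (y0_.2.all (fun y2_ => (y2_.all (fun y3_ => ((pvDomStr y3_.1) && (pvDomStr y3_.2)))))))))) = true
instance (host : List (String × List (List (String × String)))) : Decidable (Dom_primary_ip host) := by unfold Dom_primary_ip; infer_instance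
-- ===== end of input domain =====

-- ===== PORT A =====
-- A: two sequential scans with early return — first for the main interface's IP, then for any IP.
-- B: one traversal with two write-once accumulators. Equivalence of return values is proved; no side effects.
def pvLoopMain : List (List (String × String)) → Option String
  | [] => none
  | iface :: rest =>
    if (PySem.Dict.getD (PySem.Dict.mk iface) "main" "0") = "1" then
      let ip := (PySem.Dict.get? (PySem.Dict.mk iface) "ip").getD ""
      if ip ≠ "" then some ip else pvLoopMain rest
    else pvLoopMain rest

def pvLoopAny : List (List (String × String)) → Option String
  | [] => none
  | iface :: rest =>
    let ip := (PySem.Dict.get? (PySem.Dict.mk iface) "ip").getD ""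
    if ip ≠ "" then some ip else pvLoopAny rest

def primary_ip (host : List (String × List (List (String × String)))) : String :=
  let interfaces := (PySem.Dict.get? (PySem.Dict.mk host) "interfaces").getD []
  match pvLoopMain interfaces with
  | some ip => ip
  | none =>
    match pvLoopAny interfaces with
    | some ip => ip
    | none => ""

-- ===== PORT B =====
def pvLoopB : Option String → Option String → List (List (String × String)) → Option String × Option String
  | m, f, [] => (m, f)
  | m, f, iface :: rest =>
    let ip := (PySem.Dict.get? (PySem.Dict.mk iface) "ip").getD ""
    if ip = "" then pvLoopB m f rest
    else
      let f' := if f = none then some ip else f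
      let m' := if m = none ∧ (PySem.Dict.getD (PySem.Dict.mk iface) "main" "0") = "1" then some ip else m
      pvLoopB m' f' rest

def primary_ip_alt (host : List (String × List (List (String × String)))) : String :=
  match pvLoopB none none ((PySem.Dict.get? (PySem.Dict.mk host) "interfaces").getD []) with
  | (some m, _) => m
  | (none, some f) => f
  | (none, none) => ""

-- ===== PRECONDITION & SPEC =====
def Spec_primary_ip (host : List (String × List (List (String × String)))) (out : String) : Prop := out = primary_ip_alt host
instance (host : List (String × List (List (String × String)))) (out : String) : Decidable (Spec_primary_ip host out) := by unfold Spec_primary_ip; infer_instance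

-- ===== CLAIM (what is proved, stated in full; the proofs are below) =====
def Claim_equal_primary_ip : Prop := ∀ (host : List (String × List (List (String × String)))), Dom_primary_ip host → Spec_primary_ip host (primary_ip host)

-- ===== LEMMAS AND PROOFS =====
theorem pvLoopB_eq (l : List (List (String × String))) (m f : Option String) :
    pvLoopB m f l = (m.orElse (fun _ => pvLoopMain l), f.orElse (fun _ => pvLoopAny l)) := by
  induction l generalizing m f with
  | nil => cases m <;> cases f <;> simp [pvLoopB, pvLoopMain, pvLoopAny]
  | cons iface rest ih =>
    simp only [pvLoopB, pvLoopMain, pvLoopAny]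
    by_cases hip : (PySem.Dict.get? (PySem.Dict.mk iface) "ip").getD "" = ""
    · by_cases hmain : (PySem.Dict.getD (PySem.Dict.mk iface) "main" "0") = "1" <;>
        simp [hip, hmain, ih]
    · by_cases hmain : (PySem.Dict.getD (PySem.Dict.mk iface) "main" "0") = "1" <;>
        cases m <;> cases f <;> simp [hip, hmain, ih]

theorem primary_ip_eq_alt (host : List (String × List (List (String × String)))) :
    primary_ip host = primary_ip_alt host := by
  unfold primary_ip primary_ip_alt
  rw [pvLoopB_eq]
  cases hm : pvLoopMain ((PySem.Dict.get? (PySem.Dict.mk host) "interfaces").getD []) <;>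
    cases ha : pvLoopAny ((PySem.Dict.get? (PySem.Dict.mk host) "interfaces").getD []) <;>
      simp [hm, ha, Option.orElse]

-- ===== VERDICT (by name: the statement is the Claim_ definition above) =====
theorem primary_ip_spec : Claim_equal_primary_ip := by
  intro host _
  unfold Spec_primary_ip
  exact primary_ip_eq_alt host
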